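-- pv_equiv track=rewrite | github.com/Zonix5/AoC | 05/1.py | verifier_sequence
-- ===== SOURCE A (Python) =====
-- def verifier_sequence(liste_nombres, dict_regle):
--     for i in range(len(liste_nombres)):
--         nombre_actuel = liste_nombres[i]
--         nombres_suivants = liste_nombres[i+1:]
--
--         for nombre_suivant in nombres_suivants:
--             if nombre_suivant not in dict_regle[nombre_actuel][0]:
--                 return False
--
--     return True
-- ===== SOURCE B (Python) =====
-- def verifier_sequence(liste_nombres, dict_regle):
--     seen = set()
--     for current in reversed(liste_nombres):
--         if seen and not seen.issubset(dict_regle[current][0]):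
--             return False
--         seen.add(current)
--     return True
-- ===== Notes on version B (the rewrite author's own statement) =====
-- stated objective: simpler
-- what changed: Replaced the nested loop over every (earlier, later) pair by a single reverse pass that maintains a running set of already-seen later elements and does one subset test per element. Pre_ excludes inputs where some non-final element lacks a nonempty rule entry, on which A either raises KeyError/IndexError or happens to return False only because an earlier violation short-circuits before the bad lookup; B may raise there too, in its own order.
-- outside the precondition, e.g. on verifier_sequence([1, 5, 3], {1: [[2, 3]]}): A returns False, B raises KeyError
import Mathlib
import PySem

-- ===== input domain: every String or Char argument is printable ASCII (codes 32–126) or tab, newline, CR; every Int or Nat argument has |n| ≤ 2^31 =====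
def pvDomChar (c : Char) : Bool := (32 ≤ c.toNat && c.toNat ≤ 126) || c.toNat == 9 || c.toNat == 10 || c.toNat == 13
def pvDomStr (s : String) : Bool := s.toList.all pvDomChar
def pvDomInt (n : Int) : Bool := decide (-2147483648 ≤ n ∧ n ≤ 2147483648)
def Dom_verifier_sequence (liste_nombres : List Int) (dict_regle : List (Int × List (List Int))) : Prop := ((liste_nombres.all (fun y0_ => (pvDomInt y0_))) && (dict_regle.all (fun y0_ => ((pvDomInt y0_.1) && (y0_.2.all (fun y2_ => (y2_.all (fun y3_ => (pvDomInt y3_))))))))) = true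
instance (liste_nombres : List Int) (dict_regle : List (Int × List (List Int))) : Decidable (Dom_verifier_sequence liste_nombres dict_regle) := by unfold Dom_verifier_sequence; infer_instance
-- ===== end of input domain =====

-- B replaces A's nested pairwise membership checks by one reverse pass with a running set
-- of later elements and a subset test per element (objective: simpler).

-- dict_regle[x][0]; lookup is exact under Pre_ (key present, value list nonempty);
-- on a missing key / empty value Python raises, PySem's total getD/pyGetD pick [] there.
def pvAllowed (dict_regle : List (Int × List (List Int))) (x : Int) : List Int :=
  PySem.List.pyGetD (PySem.Dict.getD (PySem.Dict.mk dict_regle) x []) 0 []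

-- ===== PORT A =====
-- inner loop: 'for nombre_suivant in nombres_suivants: if nombre_suivant not in allowed: return False'
def pvTailA (allowed : List Int) : List Int → Bool
  | [] => true
  | y :: ys => if allowed.contains y = false then false else pvTailA allowed ys

-- outer loop over i: nombre_actuel = liste_nombres[i], nombres_suivants = liste_nombres[i+1:],
-- written as the obvious structural recursion producing the same (current, tail) pairs in order
def pvOuterA (dict_regle : List (Int × List (List Int))) : List Int → Bool
  | [] => true
  | x :: xs =>
    if pvTailA (pvAllowed dict_regle x) xs = false then false
    else pvOuterA dict_regle xs

def verifier_sequence (liste_nombres : List Int) (dict_regle : List (Int × List (List Int))) : Bool :=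
  pvOuterA dict_regle liste_nombres

-- ===== PORT B =====
-- 'for current in reversed(liste_nombres): if seen and not seen.issubset(allowed): return False; seen.add(current)'
def pvLoopB (dict_regle : List (Int × List (List Int))) : List Int → PySem.Set Int → Bool
  | [], _ => true
  | x :: xs, seen =>
    if seen.isEmpty = false ∧ PySem.Set.issubset seen (pvAllowed dict_regle x) = false then false
    else pvLoopB dict_regle xs (PySem.Set.add seen x)

def verifier_sequence_alt (liste_nombres : List Int) (dict_regle : List (Int × List (List Int))) : Bool :=
  pvLoopB dict_regle liste_nombres.reverse PySem.Set.empty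

-- ===== PRECONDITION & SPEC =====
-- Pre_ excludes inputs where some non-final element lacks a nonempty rule entry, on which
-- A either raises KeyError/IndexError or returns False only because an earlier violation
-- short-circuits before the bad lookup; B may raise there too, in its own order.
def Pre_verifier_sequence (liste_nombres : List Int) (dict_regle : List (Int × List (List Int))) : Prop :=
  ∀ x ∈ liste_nombres.dropLast, PySem.Dict.getD (PySem.Dict.mk dict_regle) x [] ≠ []
instance (liste_nombres : List Int) (dict_regle : List (Int × List (List Int))) : Decidable (Pre_verifier_sequence liste_nombres dict_regle) := by unfold Pre_verifier_sequence; infer_instance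

def pvWitness_verifier_sequence : List Int × (List (Int × List (List Int))) :=
  ([1, 2], [(1, [[2]])])

def Spec_verifier_sequence (liste_nombres : List Int) (dict_regle : List (Int × List (List Int))) (out : Bool) : Prop := out = verifier_sequence_alt liste_nombres dict_regle
instance (liste_nombres : List Int) (dict_regle : List (Int × List (List Int))) (out : Bool) : Decidable (Spec_verifier_sequence liste_nombres dict_regle out) := by unfold Spec_verifier_sequence; infer_instance

-- ===== CLAIM (what is proved, stated in full; the proofs are below) =====
def Claim_equal_verifier_sequence : Prop := ∀ (liste_nombres : List Int) (dict_regle : List (Int × List (List Int))), Dom_verifier_sequence liste_nombres dict_regle → Pre_verifier_sequence liste_nombres dict_regle → Spec_verifier_sequence liste_nombres dict_regle (verifier_sequence liste_nombres dict_regle)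

-- ===== LEMMAS AND PROOFS =====

theorem pvTailA_eq_all (allowed : List Int) (xs : List Int) :
    pvTailA allowed xs = xs.all (fun y => allowed.contains y) := by
  induction xs with
  | nil => rfl
  | cons y ys ih =>
    simp only [pvTailA, List.all_cons, ih]
    cases h : allowed.contains y <;> simp

-- one step of B's loop, as a Bool factor
def pvCheckB (dict_regle : List (Int × List (List Int))) (seen : PySem.Set Int) (x : Int) : Bool :=
  if seen.isEmpty = false ∧ PySem.Set.issubset seen (pvAllowed dict_regle x) = false then false
  else true

theorem pvLoopB_cons (d : List (Int × List (List Int))) (x : Int) (xs : List Int) (seen : PySem.Set Int) :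
    pvLoopB d (x :: xs) seen = (pvCheckB d seen x && pvLoopB d xs (PySem.Set.add seen x)) := by
  simp only [pvLoopB, pvCheckB]
  split_ifs <;> simp

theorem pvCheckB_eq_issubset (d : List (Int × List (List Int))) (seen : PySem.Set Int) (x : Int) :
    pvCheckB d seen x = PySem.Set.issubset seen (pvAllowed d x) := by
  unfold pvCheckB
  cases he : seen.isEmpty with
  | true =>
    have : seen = [] := List.isEmpty_iff.mp he
    subst this
    simp [PySem.Set.issubset_iff]
  | false =>
    cases hs : PySem.Set.issubset seen (pvAllowed d x) <;> simp 

theorem pvLoopB_append_one (d : List (Int × List (List Int))) (rl : List Int) (x : Int) (seen : PySem.Set Int) :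
    pvLoopB d (rl ++ [x]) seen
      = (pvLoopB d rl seen && pvCheckB d (rl.foldl PySem.Set.add seen) x) := by
  induction rl generalizing seen with
  | nil => simp [pvLoopB_cons, pvLoopB, List.foldl]
  | cons r rs ih =>
    simp only [List.cons_append, pvLoopB_cons, ih, List.foldl_cons, Bool.and_assoc]

theorem mem_foldl_add (rl : List Int) (seen : PySem.Set Int) (y : Int) :
    y ∈ rl.foldl PySem.Set.add seen ↔ y ∈ seen ∨ y ∈ rl := by
  induction rl generalizing seen with
  | nil => simp
  | cons r rs ih =>
    simp only [List.foldl_cons, ih, PySem.Set.mem_add, List.mem_cons]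
    tauto

theorem issubset_foldl_add_reverse (xs : List Int) (t : List Int) :
    PySem.Set.issubset (xs.reverse.foldl PySem.Set.add PySem.Set.empty) t
      = xs.all (fun y => t.contains y) := by
  rw [Bool.eq_iff_iff]
  rw [PySem.Set.issubset_iff, List.all_eq_true]
  constructor
  · intro h y hy
    have := h y ((mem_foldl_add _ _ _).mpr (Or.inr (List.mem_reverse.mpr hy)))
    simpa using this
  · intro h y hy
    rcases (mem_foldl_add _ _ _).mp hy with h0 | h1
    · cases h0
    · simpa using h y (List.mem_reverse.mp h1)

theorem pvLoopB_reverse_eq_outerA (d : List (Int × List (List Int))) (l : List Int) :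
    pvLoopB d l.reverse PySem.Set.empty = pvOuterA d l := by
  induction l with
  | nil => rfl
  | cons x xs ih =>
    have hrev : (x :: xs).reverse = xs.reverse ++ [x] := by simp
    rw [hrev, pvLoopB_append_one, ih, pvCheckB_eq_issubset, issubset_foldl_add_reverse]
    simp only [pvOuterA, pvTailA_eq_all]
    cases h : xs.all (fun y => (pvAllowed d x).contains y) <;>
      cases h2 : pvOuterA d xs <;> simp

-- ===== VERDICT (by name: the statement is the Claim_ definition above) =====
theorem verifier_sequence_spec : Claim_equal_verifier_sequence := by
  intro l d _ _
  unfold Spec_verifier_sequence verifier_sequence verifier_sequence_alt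
  exact (pvLoopB_reverse_eq_outerA d l).symm
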